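-- pv_equiv track=rewrite | github.com/victorminator/binkspals | appv7/main.py | paragraph_to_list
-- ===== SOURCE A (Python) =====
-- def paragraph_to_list(chaine:str):
--     if not chaine.endswith(' '):
--         chaine += ' '
--     final_list = []
--     last_word_index = 0
--     for i in range(len(chaine)):
--         if chaine[i] == " ":
--             final_list.append(chaine[last_word_index:i])
--             last_word_index = i + 1
--         elif chaine[i] == "\n":
--             final_list.append(chaine[last_word_index:i])
--             final_list.append("\n")
--             last_word_index = i + 1
--     return final_list
-- ===== SOURCE B (Python) =====
-- def paragraph_to_list(chaine: str):
--     if not chaine.endswith(' '):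
--         chaine += ' '
--     final_list = []
--     for chunk in chaine.split(' ')[:-1]:
--         parts = chunk.split('\n')
--         final_list.append(parts[0])
--         for part in parts[1:]:
--             final_list.append('\n')
--             final_list.append(part)
--     return final_list
-- ===== Notes on version B (the rewrite author's own statement) =====
-- stated objective: idiomatic
-- what changed: B replaces A's per-character index loop with last_word_index slice bookkeeping by a split-based decomposition: it splits the space-terminated string on the space character, drops the always-empty final chunk, and expands each chunk by splitting it on newlines and interleaving newline tokens.
import Mathlib
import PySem

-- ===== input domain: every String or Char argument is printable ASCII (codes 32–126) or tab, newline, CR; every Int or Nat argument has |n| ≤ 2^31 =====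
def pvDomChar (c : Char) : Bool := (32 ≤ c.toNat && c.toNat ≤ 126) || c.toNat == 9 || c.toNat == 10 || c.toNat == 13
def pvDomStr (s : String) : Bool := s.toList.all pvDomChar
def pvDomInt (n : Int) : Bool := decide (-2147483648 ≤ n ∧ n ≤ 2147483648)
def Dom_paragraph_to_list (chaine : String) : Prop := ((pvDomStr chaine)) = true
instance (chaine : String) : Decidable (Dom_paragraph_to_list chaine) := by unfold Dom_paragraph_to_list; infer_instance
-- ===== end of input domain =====

-- B tokenises via split-based decomposition instead of A's per-character index loop with slice bookkeeping (idiomatic; a timing run measured B faster by a constant factor).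

-- ===== PORT A =====
-- A: append ' ' if missing, then scan indices, slicing out the token since last_word_index
-- at each ' ' (one token) or '\n' (token plus a "\n" token).
def paragraph_to_list (chaine : String) : List String :=
  let ch : List Char :=
    if PySem.Chars.endswith chaine.toList [' '] then chaine.toList
    else chaine.toList ++ [' ']
  ((PySem.List.pyRange 0 (ch.length : Int) 1).foldl
    (fun (st : List String × Int) i =>
      match PySem.List.pyGet? ch i with
      | some c =>
        if c = ' ' then
          (st.1 ++ [String.mk (PySem.List.slice ch (some st.2) (some i))], i + 1)
        else if c = '\n' then
          (st.1 ++ [String.mk (PySem.List.slice ch (some st.2) (some i)), "\n"], i + 1)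
        else st
      | none => st)
    ([], 0)).1

-- ===== PORT B =====
-- chunk.split('\n') expanded to tokens: the first part, then '\n' before each later part.
def pvChunkTokens (chunk : List Char) : List String :=
  match chunk.splitOn '\n' with
  | [] => []
  | p0 :: rest => String.mk p0 :: rest.flatMap (fun p => ["\n", String.mk p])

-- B: guard the trailing space, split on ' ', drop the final empty chunk ([:-1]),
-- and append each chunk's tokens.
def paragraph_to_list_alt (chaine : String) : List String :=
  let ch : List Char :=
    if PySem.Chars.endswith chaine.toList [' '] then chaine.toList
    else chaine.toList ++ [' ']
  ((ch.splitOn ' ').dropLast).foldl (fun fl chunk => fl ++ pvChunkTokens chunk) []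

-- ===== PRECONDITION & SPEC =====
def Spec_paragraph_to_list (chaine : String) (out : List String) : Prop := out = paragraph_to_list_alt chaine
instance (chaine : String) (out : List String) : Decidable (Spec_paragraph_to_list chaine out) := by unfold Spec_paragraph_to_list; infer_instance

-- ===== CLAIM (what is proved, stated in full; the proofs are below) =====
def Claim_equal_paragraph_to_list : Prop := ∀ (chaine : String), Dom_paragraph_to_list chaine → Spec_paragraph_to_list chaine (paragraph_to_list chaine)

-- ===== LEMMAS AND PROOFS =====

-- Reference tokeniser matching A's eager emission: cur is the pending word
-- (never containing ' ' or '\n').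
def pvTokA (cur : List Char) : List Char → List String
  | [] => []
  | c :: t =>
    if c = ' ' then String.mk cur :: pvTokA [] t
    else if c = '\n' then String.mk cur :: "\n" :: pvTokA [] t
    else pvTokA (cur ++ [c]) t

-- Reference tokeniser matching B's chunking: cur is the pending chunk
-- (never containing ' ', but possibly containing '\n'), expanded by pvChunkTokens.
def pvRef (cur : List Char) : List Char → List String
  | [] => []
  | c :: t => if c = ' ' then pvChunkTokens cur ++ pvRef [] t else pvRef (cur ++ [c]) t

lemma pv_getLast?_tail {c : Char} {t : List Char} (ht : t ≠ []) (h : (c :: t).getLast? = some ' ') :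
    t.getLast? = some ' ' := by
  cases t with
  | nil => exact absurd rfl ht
  | cons d t' => rwa [List.getLast?_cons_cons] at h

lemma pv_splitOn_no_sep {u : List Char} {s : Char} (h : s ∉ u) : u.splitOn s = [u] := by
  induction u with
  | nil => simp [List.splitOn, List.splitOnP_nil]
  | cons a t ih =>
    have hane : ¬ a = s := fun hh => h (by simp [hh])
    have iht := ih (fun hm => h (List.mem_cons_of_mem _ hm))
    simp only [List.splitOn] at iht ⊢
    rw [List.splitOnP_cons]
    simp [hane, iht, List.modifyHead]

lemma pv_splitOn_sep_append {u v : List Char} {s : Char} (h : s ∉ u) :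
    (u ++ s :: v).splitOn s = u :: v.splitOn s := by
  induction u with
  | nil => simp [List.splitOn, List.splitOnP_cons]
  | cons a t ih =>
    have hane : ¬ a = s := fun hh => h (by simp [hh])
    have iht := ih (fun hm => h (List.mem_cons_of_mem _ hm))
    simp only [List.splitOn, List.cons_append] at iht ⊢
    rw [List.splitOnP_cons]
    simp [hane, iht, List.modifyHead]

lemma pv_splitOn_ne_nil (u : List Char) (s : Char) : u.splitOn s ≠ [] := by
  induction u with
  | nil => simp [List.splitOn, List.splitOnP_nil]
  | cons a t ih =>
    simp only [List.splitOn, List.splitOnP_cons] at *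
    by_cases ha : (a == s) = true
    · simp [ha]
    · simp only [ha, if_false]
      cases ht : t.splitOnP (· == s) with
      | nil => exact absurd ht ih
      | cons x xs => simp [List.modifyHead]

lemma pv_splitOn_append_last {u v : List Char} {s : Char} (h : s ∉ v) :
    (u ++ s :: v).splitOn s = u.splitOn s ++ [v] := by
  induction u with
  | nil =>
    have hv := pv_splitOn_no_sep h
    simp only [List.nil_append, List.splitOn] at hv ⊢
    rw [List.splitOnP_cons]
    simp [hv]
  | cons a t ih =>
    by_cases hae : a = s
    · subst hae
      simp only [List.splitOn, List.cons_append] at ih ⊢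
      rw [List.splitOnP_cons, List.splitOnP_cons]
      simp [ih]
    · simp only [List.splitOn, List.cons_append] at ih ⊢
      rw [List.splitOnP_cons, List.splitOnP_cons]
      have hb : ¬ (a == s) = true := by simp [hae]
      simp only [hb, if_false]
      rw [ih]
      cases ht : t.splitOnP (· == s) with
      | nil =>
        have := pv_splitOn_ne_nil t s
        simp only [List.splitOn] at this
        exact absurd ht this
      | cons x xs => simp [List.modifyHead]

lemma pv_chunk_no_nl {u : List Char} (h : '\n' ∉ u) : pvChunkTokens u = [String.mk u] := by
  simp [pvChunkTokens, pv_splitOn_no_sep h]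

lemma pv_chunk_split {u v : List Char} (h : '\n' ∉ v) :
    pvChunkTokens (u ++ '\n' :: v) = pvChunkTokens u ++ ["\n", String.mk v] := by
  unfold pvChunkTokens
  rw [pv_splitOn_append_last h]
  cases hu : u.splitOn '\n' with
  | nil => exact absurd hu (pv_splitOn_ne_nil u '\n')
  | cons p0 rest => simp

-- pvRef with a pending chunk (optional already-closed part u, then '\n', then a
-- '\n'-free tail cur) produces u's tokens, a "\n", and then behaves like pvTokA.
lemma pvQ (t : List Char) : ∀ (u : Option (List Char)) (cur : List Char),
    '\n' ∉ cur → t.getLast? = some ' ' →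
    pvRef ((u.elim [] (· ++ ['\n'])) ++ cur) t
      = (u.elim [] (fun w => pvChunkTokens w ++ ["\n"])) ++ pvTokA cur t := by
  induction t with
  | nil => intro u cur _ h; simp at h
  | cons c t ih =>
    intro u cur hcur h
    have htail : t ≠ [] → pvRef [] t = pvTokA [] t := by
      intro ht
      have h' := pv_getLast?_tail ht h
      simpa using ih none [] (by simp) h'
    by_cases hc : c = ' '
    · subst hc
      have htail' : pvRef [] t = pvTokA [] t := by
        by_cases ht : t = []
        · subst ht; simp [pvRef, pvTokA]
        · exact htail ht
      cases u with
      | none =>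
        simp only [Option.elim_none, List.nil_append]
        rw [show pvRef cur (' ' :: t) = pvChunkTokens cur ++ pvRef [] t from by simp [pvRef]]
        rw [pv_chunk_no_nl hcur, htail']
        simp [pvTokA]
      | some w =>
        simp only [Option.elim_some]
        rw [show (w ++ ['\n']) ++ cur = w ++ '\n' :: cur from by simp]
        rw [show pvRef (w ++ '\n' :: cur) (' ' :: t) = pvChunkTokens (w ++ '\n' :: cur) ++ pvRef [] t from by
          simp [pvRef]]
        rw [pv_chunk_split hcur, htail']
        simp [pvTokA]
    · by_cases hn : c = '\n'
      · subst hn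
        have ht : t ≠ [] := by rintro rfl; simp_all
        have h' := pv_getLast?_tail ht h
        cases u with
        | none =>
          simp only [Option.elim_none, List.nil_append]
          rw [show pvRef cur ('\n' :: t) = pvRef (cur ++ ['\n']) t from by simp [pvRef]]
          have hih := ih (some cur) [] (by simp) h'
          simp only [Option.elim_some, List.append_nil] at hih
          rw [hih, pv_chunk_no_nl hcur]
          simp [pvTokA]
        | some w =>
          simp only [Option.elim_some]
          rw [show (w ++ ['\n']) ++ cur = w ++ '\n' :: cur from by simp]
          rw [show pvRef (w ++ '\n' :: cur) ('\n' :: t) = pvRef ((w ++ '\n' :: cur) ++ ['\n']) t from by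
            simp [pvRef]]
          have hih := ih (some (w ++ '\n' :: cur)) [] (by simp) h'
          simp only [Option.elim_some, List.append_nil] at hih
          rw [hih, pv_chunk_split hcur]
          simp [pvTokA]
      · have ht : t ≠ [] := by rintro rfl; simp_all
        have h' := pv_getLast?_tail ht h
        have hcur' : '\n' ∉ cur ++ [c] := by
          simp only [List.mem_append, List.mem_singleton]
          rintro (hm | hm)
          · exact hcur hm
          · exact hn hm.symm
        have e : pvRef ((u.elim [] (· ++ ['\n'])) ++ cur) (c :: t)
            = pvRef ((u.elim [] (· ++ ['\n'])) ++ (cur ++ [c])) t := by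
          simp [pvRef, hc, List.append_assoc]
        rw [e, ih u (cur ++ [c]) hcur' h']
        rw [show pvTokA cur (c :: t) = pvTokA (cur ++ [c]) t from by simp [pvTokA, hc, hn]]

-- B's chunk expansion equals pvRef.
lemma pvB (t : List Char) : ∀ (cur : List Char), ' ' ∉ cur →
    ((cur ++ t).splitOn ' ').dropLast.flatMap pvChunkTokens = pvRef cur t := by
  induction t with
  | nil => intro cur h; simp [pv_splitOn_no_sep h, pvRef]
  | cons c t ih =>
    intro cur h
    by_cases hc : c = ' '
    · subst hc
      rw [pv_splitOn_sep_append h]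
      cases ht : t.splitOn ' ' with
      | nil => exact absurd ht (pv_splitOn_ne_nil t ' ')
      | cons x xs =>
        have hb := ih [] (by simp)
        simp only [List.nil_append] at hb
        simp [pvRef, List.dropLast_cons_of_ne_nil, ht, ← hb]
    · have hcur' : ' ' ∉ cur ++ [c] := by
        simp only [List.mem_append, List.mem_singleton]
        rintro (hm | hm)
        · exact h hm
        · exact hc hm.symm
      have e : cur ++ c :: t = (cur ++ [c]) ++ t := by simp
      rw [e, ih (cur ++ [c]) hcur']
      simp [pvRef, hc]

-- A's index loop with slice bookkeeping equals pvTokA.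
lemma pvLoopA (ch : List Char) : ∀ (m k j : Nat) (fl : List String),
    m = ch.length - k → j ≤ k → k ≤ ch.length →
    (List.foldl
      (fun (st : List String × Int) i =>
        match PySem.List.pyGet? ch i with
        | some c =>
          if c = ' ' then
            (st.1 ++ [String.mk (PySem.List.slice ch (some st.2) (some i))], i + 1)
          else if c = '\n' then
            (st.1 ++ [String.mk (PySem.List.slice ch (some st.2) (some i)), "\n"], i + 1)
          else st
        | none => st)
      (fl, (j : Int)) (PySem.List.pyRange (k : Int) (ch.length : Int) 1)).1
    = fl ++ pvTokA (List.take (k - j) (List.drop j ch)) (ch.drop k) := by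
  intro m
  induction m with
  | zero =>
    intro k j fl hm hjk hk
    have hk' : k = ch.length := by omega
    have hnil : PySem.List.pyRange (k : Int) (ch.length : Int) 1 = [] := by
      rw [hk']; simp [PySem.List.pyRange]
    rw [hnil]
    rw [hk']
    simp [pvTokA]
  | succ m ih =>
    intro k j fl hm hjk hk
    have hklt : k < ch.length := by omega
    rw [PySem.List.pyRange_one_cons (by exact_mod_cast hklt), List.foldl_cons]
    have hget : PySem.List.pyGet? ch (k : Int) = some ch[k] := by
      rw [PySem.List.pyGet?_natCast]
      simp [List.getElem?_eq_getElem hklt]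
    have hdrop : ch.drop k = ch[k] :: ch.drop (k + 1) :=
      List.drop_eq_getElem_cons hklt
    have hslice : PySem.List.slice ch (some (j : Int)) (some (k : Int))
        = List.take (k - j) (List.drop j ch) := PySem.List.slice_natCast ch j k
    have hcast : ((k : Int) + 1) = ((k + 1 : Nat) : Int) := by push_cast; ring
    simp only [hget]
    by_cases hsp : ch[k] = ' '
    · rw [if_pos hsp, hslice, hcast, ih (k + 1) (k + 1) _ (by omega) (le_refl _) (by omega)]
      rw [hdrop]
      simp [pvTokA, hsp]
    · by_cases hnl : ch[k] = '\n'
      · rw [if_neg hsp, if_pos hnl, hslice, hcast,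
          ih (k + 1) (k + 1) _ (by omega) (le_refl _) (by omega)]
        rw [hdrop]
        simp [pvTokA, hsp, hnl]
      · rw [if_neg hsp, if_neg hnl, hcast, ih (k + 1) j fl (by omega) (by omega) (by omega)]
        rw [hdrop]
        have htake : List.take (k + 1 - j) (List.drop j ch)
            = List.take (k - j) (List.drop j ch) ++ [ch[k]] := by
          have h1 : k + 1 - j = (k - j) + 1 := by omega
          have h2 : k - j < (List.drop j ch).length := by
            simp [List.length_drop]; omega
          rw [h1, List.take_succ]
          have hg : (List.drop j ch)[k - j]? = some ch[k] := by
            rw [List.getElem?_eq_getElem h2]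
            congr 1
            rw [List.getElem_drop]
            congr 1
            omega
          simp [hg]
        rw [htake]
        rw [show pvTokA (List.take (k - j) (List.drop j ch)) (ch[k] :: ch.drop (k + 1))
            = pvTokA (List.take (k - j) (List.drop j ch) ++ [ch[k]]) (ch.drop (k + 1)) from by
          simp [pvTokA, hsp, hnl]]

-- core equality on a space-terminated character list
lemma pvMain (ch : List Char) (h : ch.getLast? = some ' ') :
    ((PySem.List.pyRange 0 (ch.length : Int) 1).foldl
      (fun (st : List String × Int) i =>
        match PySem.List.pyGet? ch i with
        | some c =>
          if c = ' ' then
            (st.1 ++ [String.mk (PySem.List.slice ch (some st.2) (some i))], i + 1)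
          else if c = '\n' then
            (st.1 ++ [String.mk (PySem.List.slice ch (some st.2) (some i)), "\n"], i + 1)
          else st
        | none => st)
      ([], 0)).1
    = ((ch.splitOn ' ').dropLast).foldl (fun fl chunk => fl ++ pvChunkTokens chunk) [] := by
  have hA := pvLoopA ch ch.length 0 0 [] (by omega) (le_refl 0) (by omega)
  simp only [Nat.cast_zero, List.drop_zero, Nat.sub_zero, List.take_zero,
    List.nil_append] at hA
  rw [hA]
  rw [PySem.List.foldl_append_eq_flatMap]
  have hB := pvB ch [] (by simp)
  simp only [List.nil_append] at hB
  rw [hB]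
  have hQ := pvQ ch none [] (by simp) h
  simp only [Option.elim_none, List.nil_append] at hQ
  rw [hQ, List.nil_append]

-- ===== VERDICT (by name: the statement is the Claim_ definition above) =====
theorem paragraph_to_list_spec : Claim_equal_paragraph_to_list := by
  intro chaine _
  unfold Spec_paragraph_to_list paragraph_to_list paragraph_to_list_alt
  by_cases he : PySem.Chars.endswith chaine.toList [' '] = true
  · simp only [he, if_pos]
    apply pvMain
    rcases (PySem.Chars.endswith_iff _ _).mp he with ⟨w, hw⟩
    rw [← hw, List.getLast?_concat]
  · simp only [he, Bool.false_eq_true, if_false]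
    apply pvMain
    rw [List.getLast?_concat]
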